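-- pv_equiv track=rewrite | github.com/phitrann/applied-data-science | BrowserCrawler/vietnamworks/crawl_info/crawl_info/spiders/get_info.py | convert_key_value
-- ===== SOURCE A (Python) =====
-- def convert_key_value(keys_dict, text_list):
--     infos = dict()
--     for index, key in enumerate(keys_dict):
--         if key not in text_list:
--             raise KeyError(f'{key} not in text_list')
--         if index == len(keys_dict) -1:
--             infos[key] = text_list[text_list.index(key)+1:]
--         else:
--             infos[key] = text_list[text_list.index(key)+1:text_list.index(keys_dict[index+1])]
--     return infos
-- ===== SOURCE B (Python) =====
-- def convert_key_value(keys_dict, text_list):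
--     # Event sweep: instead of cutting per-key slices, record at which position each
--     # key's open interval (first occurrence of the key, first occurrence of the next
--     # key / end of text) opens and closes, then walk the text once, maintaining the
--     # set of active intervals and appending each token to every active key's segment.
--     pos = {}
--     for j, t in enumerate(text_list):
--         pos.setdefault(t, j)
--     lo = [pos[k] for k in keys_dict]          # KeyError if a key is absent (A raises there too)
--     hi = lo[1:] + [len(text_list)]
--     opens = {}
--     closes = {}
--     for i, (a, b) in enumerate(zip(lo, hi)):
--         if a + 1 < b:
--             opens.setdefault(a + 1, []).append(i)
--             closes.setdefault(b, []).append(i)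
--     segs = [[] for _ in keys_dict]
--     active = []
--     for j, t in enumerate(text_list):
--         active = [i for i in active if i not in closes.get(j, [])] + opens.get(j, [])
--         for i in active:
--             segs[i].append(t)
--     return dict(zip(keys_dict, segs))
-- ===== Notes on version B (the rewrite author's own statement) =====
-- stated objective: alternative
-- what changed: B never slices and never scans per key: it records open/close events (interval = first occurrence of the key to first occurrence of the next key or end), then makes one event-driven sweep over the text, maintaining the set of active intervals and appending each token to every active key's segment.
import Mathlib
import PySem

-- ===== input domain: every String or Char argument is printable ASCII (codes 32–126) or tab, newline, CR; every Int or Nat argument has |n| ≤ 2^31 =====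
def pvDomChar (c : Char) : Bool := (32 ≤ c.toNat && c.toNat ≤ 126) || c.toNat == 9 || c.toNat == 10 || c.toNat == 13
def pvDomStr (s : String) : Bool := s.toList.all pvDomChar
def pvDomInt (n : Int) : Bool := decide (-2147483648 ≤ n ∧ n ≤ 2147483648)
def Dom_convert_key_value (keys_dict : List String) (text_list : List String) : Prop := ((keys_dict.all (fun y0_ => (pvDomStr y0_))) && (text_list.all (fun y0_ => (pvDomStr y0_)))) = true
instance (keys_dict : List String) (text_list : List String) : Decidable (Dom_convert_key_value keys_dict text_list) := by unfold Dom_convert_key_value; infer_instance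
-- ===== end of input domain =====

-- B replaces A's per-key membership scan / .index / slicing by an event sweep:
-- interval open/close events are recorded per position, and one pass over the text
-- appends each token to every active key's segment (objective: alternative algorithm).

-- ===== PORT A =====
-- On a key absent from text_list the Python raises (KeyError);
-- Pre_ excludes those inputs (there PySem.List.index? is none and the port takes .getD 0).
def convert_key_value (keys_dict : List String) (text_list : List String) : List (String × List String) :=
  ((PySem.List.enumerate keys_dict).foldl (fun infos p =>
      if p.1 == (keys_dict.length : Int) - 1 then
        infos.insert p.2 (PySem.List.slice text_list
          (some (((PySem.List.index? text_list p.2).getD 0 : Int) + 1)) none)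
      else
        infos.insert p.2 (PySem.List.slice text_list
          (some (((PySem.List.index? text_list p.2).getD 0 : Int) + 1))
          (some ((PySem.List.index? text_list (PySem.List.pyGetD keys_dict (p.1 + 1) "")).getD 0 : Int))))
    PySem.Dict.empty).items

-- ===== PORT B =====
def convert_key_value_alt (keys_dict : List String) (text_list : List String) : List (String × List String) :=
  let pos : PySem.Dict String Int :=
    (PySem.List.enumerate text_list).foldl (fun d p => d.setdefault p.2 p.1) PySem.Dict.empty
  let lo : List Int := keys_dict.map (fun k => pos.getD k 0)
  let hi : List Int := lo.drop 1 ++ [(text_list.length : Int)]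
  -- opens/closes: interval open/close events, keyed by position
  let oc : PySem.Dict Int (List Int) × PySem.Dict Int (List Int) :=
    (PySem.List.enumerate (lo.zip hi)).foldl
      (fun oc p =>
        if p.2.1 + 1 < p.2.2 then
          (oc.1.modify (p.2.1 + 1) [] (fun l => l ++ [p.1]),
           oc.2.modify p.2.2 [] (fun l => l ++ [p.1]))
        else oc)
      (PySem.Dict.empty, PySem.Dict.empty)
  -- the event-driven pass: state = (active interval indices, segments); every i in
  -- active is a valid nonnegative index into segs (so segs[i].append(t) never raises)
  let fin : List Int × List (List String) :=
    (PySem.List.enumerate text_list).foldl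
      (fun st p =>
        let act := (st.1.filter (fun i => !((oc.2.getD p.1 []).contains i))) ++ oc.1.getD p.1 []
        (act, act.foldl (fun sg i => sg.set i.toNat ((sg[i.toNat]?.getD []) ++ [p.2])) st.2))
      ([], keys_dict.map (fun _ => []))
  ((keys_dict.zip fin.2).foldl (fun d q => d.insert q.1 q.2) PySem.Dict.empty).items

-- ===== PRECONDITION & SPEC =====
-- A raises KeyError on any key of keys_dict missing from text_list; Pre_ excludes exactly those inputs.
def Pre_convert_key_value (keys_dict : List String) (text_list : List String) : Prop :=
  ∀ k ∈ keys_dict, k ∈ text_list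
instance (keys_dict : List String) (text_list : List String) : Decidable (Pre_convert_key_value keys_dict text_list) := by unfold Pre_convert_key_value; infer_instance
def pvWitness_convert_key_value : List String × List String := (["a", "b"], ["a", "x", "b", "y"])

def Spec_convert_key_value (keys_dict : List String) (text_list : List String) (out : List (String × List String)) : Prop := out = convert_key_value_alt keys_dict text_list
instance (keys_dict : List String) (text_list : List String) (out : List (String × List String)) : Decidable (Spec_convert_key_value keys_dict text_list out) := by unfold Spec_convert_key_value; infer_instance

-- ===== CLAIM (what is proved, stated in full; the proofs are below) =====
def Claim_equal_convert_key_value : Prop := ∀ (keys_dict : List String) (text_list : List String), Dom_convert_key_value keys_dict text_list → Pre_convert_key_value keys_dict text_list → Spec_convert_key_value keys_dict text_list (convert_key_value keys_dict text_list)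

-- ===== LEMMAS AND PROOFS =====

-- the first-index dictionary: lookup = start + first index of t in tl (first match wins)
theorem pv_pos_get? (tl : List String) (t : String) : ∀ (s : Int) (d : PySem.Dict String Int),
    ((PySem.List.enumerate tl s).foldl (fun d p => d.setdefault p.2 p.1) d).get? t
      = (d.get? t).or ((PySem.List.index? tl t).map (fun n => s + (n : Int))) := by
  induction tl with
  | nil => intro s d; simp [PySem.List.enumerate_nil, PySem.List.index?]
  | cons x r ih =>
    intro s d
    rw [PySem.List.enumerate_cons, List.foldl_cons, ih]
    by_cases hx : x = t
    · subst hx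
      simp only [PySem.Dict.get?_setdefault_self, PySem.List.index?_cons_self]
      cases hd : d.get? x <;> simp
    · simp only [PySem.Dict.get?_setdefault_of_ne d s (Ne.symm hx), PySem.List.index?_cons_of_ne r hx]
      congr 1
      cases PySem.List.index? r t
      · simp
      · simp; ring

-- two insert-folds build the same dict when the (key, value) streams coincide
theorem pv_foldl_insert_congr {α β κ ν : Type} [BEq κ]
    (k1 : α → κ) (v1 : α → ν) (k2 : β → κ) (v2 : β → ν)
    (f1 : PySem.Dict κ ν → α → PySem.Dict κ ν) (f2 : PySem.Dict κ ν → β → PySem.Dict κ ν)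
    (hf1 : ∀ d a, f1 d a = d.insert (k1 a) (v1 a)) (hf2 : ∀ d b, f2 d b = d.insert (k2 b) (v2 b)) :
    ∀ (l1 : List α) (l2 : List β) (d : PySem.Dict κ ν),
    l1.map (fun a => (k1 a, v1 a)) = l2.map (fun b => (k2 b, v2 b)) →
    l1.foldl f1 d = l2.foldl f2 d := by
  intro l1
  induction l1 with
  | nil => intro l2 d h; cases l2 <;> simp_all
  | cons a t ih =>
    intro l2 d h
    cases l2 with
    | nil => simp at h
    | cons b t2 =>
      simp only [List.map_cons, List.cons.injEq, Prod.mk.injEq] at h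
      obtain ⟨⟨hk, hv⟩, ht⟩ := h
      simp only [List.foldl_cons, hf1, hf2, hk, hv]
      exact ih t2 _ ht

-- tokens whose index lies strictly between a and b, read off enumerate, are a drop/take
theorem pv_filter_enum (xs : List String) : ∀ (s a b : Nat),
    ((PySem.List.enumerate xs (s : Int)).filter
        (fun c => decide ((a : Int) < c.1 ∧ c.1 < (b : Int)))).map (fun c => c.2)
      = (xs.drop (a + 1 - s)).take (b - max (a + 1) s) := by
  induction xs with
  | nil => intro s a b; simp [PySem.List.enumerate_nil]
  | cons x r ih =>
    intro s a b
    rw [PySem.List.enumerate_cons]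
    have hs1 : (s : Int) + 1 = ((s + 1 : Nat) : Int) := by push_cast; ring
    by_cases h1 : (a : Int) < (s : Int) ∧ (s : Int) < (b : Int)
    · have hsa : a < s := by exact_mod_cast h1.1
      have hsb : s < b := by exact_mod_cast h1.2
      rw [List.filter_cons_of_pos (by simpa using h1), List.map_cons, hs1, ih]
      have e1 : a + 1 - s = 0 := by omega
      have e2 : a + 1 - (s + 1) = 0 := by omega
      have e3 : b - max (a + 1) s = (b - max (a + 1) (s + 1)) + 1 := by omega
      rw [e1, e2, e3]
      simp
    · rw [List.filter_cons_of_neg (by simpa using h1), hs1, ih]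
      rcases Nat.lt_or_ge a s with hsa | hsa
      · -- a < s, so ¬ s < b, i.e. b ≤ s : both sides empty takes
        have hsb : b ≤ s := by
          by_contra hb
          exact h1 ⟨by exact_mod_cast hsa, by exact_mod_cast Nat.lt_of_not_ge hb⟩
        have e1 : a + 1 - s = 0 := by omega
        have e2 : a + 1 - (s + 1) = 0 := by omega
        have e3 : b - max (a + 1) s = 0 := by omega
        have e4 : b - max (a + 1) (s + 1) = 0 := by omega
        rw [e1, e2, e3, e4]
        simp
      · -- s ≤ a : the head is dropped on both sides
        have e1 : a + 1 - s = (a + 1 - (s + 1)) + 1 := by omega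
        have e2 : b - max (a + 1) s = b - max (a + 1) (s + 1) := by omega
        rw [e1, e2, List.drop_succ_cons]

-- a foldl over a pair state with independent components splits into two foldls
theorem pv_foldl_pair {α β γ : Type} (P : γ → Prop) [DecidablePred P]
    (f : α → γ → α) (g : β → γ → β) :
    ∀ (l : List γ) (a : α) (b : β),
    l.foldl (fun st p => if P p then (f st.1 p, g st.2 p) else st) (a, b)
      = (l.foldl (fun x p => if P p then f x p else x) a,
         l.foldl (fun y p => if P p then g y p else y) b) := by
  intro l
  induction l with
  | nil => intro a b; rfl
  | cons c l ih =>
    intro a b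
    simp only [List.foldl_cons]
    by_cases h : P c
    · rw [if_pos h, if_pos h, if_pos h, ih]
    · rw [if_neg h, if_neg h, if_neg h, ih]

-- a fold of bucket-appending dict updates, read back at one key
theorem pv_bucket (l : List (Int × (Int × Int))) (key : Int × (Int × Int) → Int) (j : Int) :
    ((l.foldl (fun d p => d.modify (key p) [] (fun s => s ++ [p.1])) PySem.Dict.empty).getD j [])
      = (l.filter (fun p => key p == j)).map (fun p => p.1) := by
  have h1 : l.foldl (fun d p => d.modify (key p) [] (fun s => s ++ [p.1])) PySem.Dict.empty
      = (l.map (fun p => (key p, p.1))).foldl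
          (fun d q => d.modify q.1 [] (fun s => s ++ [q.2])) PySem.Dict.empty := by
    rw [List.foldl_map]
  rw [h1, PySem.Dict.getD_foldl_modify_append, List.filter_map, List.map_map]
  simp [Function.comp_def]

-- i's open interval covers position j
def pvCov (w : List (Int × Int)) (i : Int) (j : Int) : Prop :=
  ∃ (m : Nat) (hm : m < w.length), i = (m : Int) ∧ (w[m]'hm).1 < j ∧ j < (w[m]'hm).2

theorem pv_cov_iff (w : List (Int × Int)) (m : Nat) (hm : m < w.length) (j : Int) :
    pvCov w (m : Int) j ↔ ((w[m]'hm).1 < j ∧ j < (w[m]'hm).2) := by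
  constructor
  · rintro ⟨m', hm', hcast, h1, h2⟩
    have : m' = m := by exact_mod_cast hcast.symm
    subst this
    exact ⟨h1, h2⟩
  · intro h
    exact ⟨m, hm, rfl, h.1, h.2⟩

theorem pv_setfold_len (t : String) : ∀ (l : List Int) (sg : List (List String)),
    (l.foldl (fun sg i => sg.set i.toNat ((sg[i.toNat]?.getD []) ++ [t])) sg).length
      = sg.length := by
  intro l
  induction l with
  | nil => intro sg; rfl
  | cons i0 r ih => intro sg; rw [List.foldl_cons, ih, List.length_set]

-- appending t to the segments of all (distinct, in-range) indices of l, componentwise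
theorem pv_setfold (t : String) : ∀ (l : List Int) (sg : List (List String)) (m : Nat)
    (hmsg : m < sg.length), l.Nodup → (∀ i ∈ l, ∃ mi : Nat, i = (mi : Int) ∧ mi < sg.length) →
    (l.foldl (fun sg i => sg.set i.toNat ((sg[i.toNat]?.getD []) ++ [t])) sg)[m]?
      = some (if (m : Int) ∈ l then (sg[m]'hmsg) ++ [t] else (sg[m]'hmsg)) := by
  intro l
  induction l with
  | nil =>
    intro sg m hmsg _ _
    rw [List.foldl_nil, List.getElem?_eq_getElem hmsg]
    simp
  | cons i0 r ih =>
    intro sg m hmsg hnd hb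
    obtain ⟨m0, rfl, hm0⟩ := hb i0 List.mem_cons_self
    rw [List.foldl_cons]
    have htn : ((m0 : Int)).toNat = m0 := Int.toNat_natCast m0
    have hsg1 : sg.set ((m0 : Int)).toNat ((sg[((m0 : Int)).toNat]?.getD []) ++ [t])
        = sg.set m0 ((sg[m0]'hm0) ++ [t]) := by
      rw [htn, List.getElem?_eq_getElem hm0]
      rfl
    rw [hsg1, ih (sg.set m0 ((sg[m0]'hm0) ++ [t])) m (by simpa using hmsg)
      (List.Nodup.of_cons hnd)
      (by intro i hi; obtain ⟨mi, h1, h2⟩ := hb i (List.mem_cons_of_mem _ hi)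
          exact ⟨mi, h1, by simpa using h2⟩)]
    by_cases hm : m = m0
    · subst hm
      have hnotr : ((m : Int)) ∉ r := (List.nodup_cons.mp hnd).1
      rw [if_neg hnotr, if_pos (List.mem_cons_self)]
      congr 1
      rw [List.getElem_set]
      simp
    · have hne : m0 ≠ m := fun h => hm h.symm
      have hgm : (sg.set m0 ((sg[m0]'hm0) ++ [t]))[m]'(by simpa using hmsg) = sg[m]'hmsg := by
        rw [List.getElem_set]
        simp [hne]
      have hcast : ((m : Int)) ≠ ((m0 : Int)) := by exact_mod_cast hm
      rw [hgm]
      by_cases hr : ((m : Int)) ∈ r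
      · rw [if_pos hr, if_pos (List.mem_cons_of_mem _ hr)]
      · rw [if_neg hr, if_neg (by simp [hcast, hr])]

-- the sweep: folding the event-driven loop over the text, the segment of interval m
-- collects exactly the tokens whose index the interval covers
theorem pv_sweep (w : List (Int × Int)) (opens closes : PySem.Dict Int (List Int))
    (hopen : ∀ (j i : Int), i ∈ opens.getD j [] ↔
      ∃ (m : Nat) (hm : m < w.length), i = (m : Int) ∧ (w[m]'hm).1 + 1 = j ∧ (w[m]'hm).1 + 1 < (w[m]'hm).2)
    (hopen_nd : ∀ j : Int, (opens.getD j []).Nodup)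
    (hclose : ∀ (j i : Int), i ∈ closes.getD j [] ↔
      ∃ (m : Nat) (hm : m < w.length), i = (m : Int) ∧ (w[m]'hm).2 = j ∧ (w[m]'hm).1 + 1 < (w[m]'hm).2) :
    ∀ (ts : List String) (jp : Int) (active : List Int) (segs : List (List String)),
      w.length ≤ segs.length → active.Nodup →
      (∀ i : Int, i ∈ active ↔ pvCov w i (jp - 1)) →
      ∀ (m : Nat) (hm : m < w.length),
      ((PySem.List.enumerate ts jp).foldl
         (fun st p =>
           let act := (st.1.filter (fun i => !((closes.getD p.1 []).contains i))) ++ opens.getD p.1 []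
           (act, act.foldl (fun sg i => sg.set i.toNat ((sg[i.toNat]?.getD []) ++ [p.2])) st.2))
         (active, segs)).2[m]?
      = some ((segs[m]?.getD []) ++
          ((PySem.List.enumerate ts jp).filter
            (fun c => decide ((w[m]'hm).1 < c.1 ∧ c.1 < (w[m]'hm).2))).map (fun c => c.2)) := by
  intro ts
  induction ts with
  | nil =>
    intro jp active segs hws hnd hact m hm
    rw [PySem.List.enumerate_nil]
    simp only [List.foldl_nil, List.filter_nil, List.map_nil, List.append_nil]
    rw [List.getElem?_eq_getElem (lt_of_lt_of_le hm hws)]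
    simp
  | cons t ts ih =>
    intro jp active segs hws hnd hact m hm
    rw [PySem.List.enumerate_cons, List.foldl_cons]
    change (List.foldl _ ((active.filter (fun i => !((closes.getD jp []).contains i))) ++ opens.getD jp [],
        ((active.filter (fun i => !((closes.getD jp []).contains i))) ++ opens.getD jp []).foldl
          (fun sg i => sg.set i.toNat ((sg[i.toNat]?.getD []) ++ [t])) segs) _).2[m]? = _
    set act : List Int :=
      (active.filter (fun i => !((closes.getD jp []).contains i))) ++ opens.getD jp [] with hactdef
    -- membership characterization of the updated active list
    have hact1 : ∀ i : Int, i ∈ act ↔ pvCov w i jp := by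
      intro i
      rw [hactdef]
      simp only [List.mem_append, List.mem_filter, Bool.not_eq_eq_eq_not, Bool.not_true,
        List.contains_eq_mem, decide_eq_false_iff_not]
      rw [hact i, hopen jp i, hclose jp i]
      constructor
      · rintro (⟨⟨m', hm', rfl, h1, h2⟩, hnc⟩ | ⟨m', hm', rfl, h1, h2⟩)
        · refine ⟨m', hm', rfl, by omega, ?_⟩
          by_cases hb : (w[m']'hm').2 = jp
          · exact absurd ⟨m', hm', rfl, hb, by omega⟩ hnc
          · omega
        · exact ⟨m', hm', rfl, by omega, by omega⟩
      · rintro ⟨m', hm', rfl, h1, h2⟩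
        by_cases hedge : (w[m']'hm').1 + 1 = jp
        · exact Or.inr ⟨m', hm', rfl, hedge, by omega⟩
        · refine Or.inl ⟨⟨m', hm', rfl, by omega, by omega⟩, ?_⟩
          rintro ⟨m'', hm'', hcast, hb, _⟩
          have : m'' = m' := by exact_mod_cast hcast.symm
          subst this
          omega
    have hnd1 : act.Nodup := by
      rw [hactdef]
      refine List.Nodup.append (List.Nodup.filter _ hnd) (hopen_nd jp) ?_
      intro i hif hio
      obtain ⟨hia, _⟩ := List.mem_filter.mp hif
      obtain ⟨m', hm', rfl, h1, h2⟩ := (hact i).mp hia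
      obtain ⟨m'', hm'', hcast, h3, h4⟩ := (hopen jp ((m' : Int))).mp hio
      have : m'' = m' := by exact_mod_cast hcast.symm
      subst this
      omega
    have hb1 : ∀ i ∈ act, ∃ mi : Nat, i = (mi : Int) ∧ mi < segs.length := by
      intro i hi
      obtain ⟨m', hm', rfl, _, _⟩ := (hact1 i).mp hi
      exact ⟨m', rfl, lt_of_lt_of_le hm' hws⟩
    have hseg1 := pv_setfold t act segs m (lt_of_lt_of_le hm hws) hnd1 hb1
    have hlen1 := pv_setfold_len t act segs
    rw [ih (jp + 1) act _ (by omega) hnd1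
      (by intro i; rw [hact1 i]
          have he : jp + 1 - 1 = jp := by omega
          rw [he]) m hm]
    rw [hseg1]
    simp only [Option.getD_some]
    have hmem : ((m : Int)) ∈ act ↔ ((w[m]'hm).1 < jp ∧ jp < (w[m]'hm).2) := by
      rw [hact1, pv_cov_iff w m hm jp]
    rw [List.filter_cons]
    by_cases hc : (w[m]'hm).1 < jp ∧ jp < (w[m]'hm).2
    · rw [if_pos (hmem.mpr hc), if_pos (by simpa using hc)]
      rw [List.getElem?_eq_getElem (lt_of_lt_of_le hm hws)]
      simp
    · rw [if_neg (fun h => hc (hmem.mp h)), if_neg (by simpa using hc)]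
      rw [List.getElem?_eq_getElem (lt_of_lt_of_le hm hws)]
      simp

theorem pv_main (keys_dict text_list : List String)
    (hpre : ∀ k ∈ keys_dict, k ∈ text_list) :
    convert_key_value keys_dict text_list = convert_key_value_alt keys_dict text_list := by
  unfold convert_key_value convert_key_value_alt
  set lo : List Int := keys_dict.map (fun k =>
    ((PySem.List.enumerate text_list).foldl (fun d p => d.setdefault p.2 p.1)
      PySem.Dict.empty).getD k 0) with hlo
  set hi : List Int := lo.drop 1 ++ [(text_list.length : Int)] with hhi
  set w : List (Int × Int) := lo.zip hi with hwdef
  set oc : PySem.Dict Int (List Int) × PySem.Dict Int (List Int) :=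
    (PySem.List.enumerate w).foldl
      (fun oc p =>
        if p.2.1 + 1 < p.2.2 then
          (oc.1.modify (p.2.1 + 1) [] (fun l => l ++ [p.1]),
           oc.2.modify p.2.2 [] (fun l => l ++ [p.1]))
        else oc)
      (PySem.Dict.empty, PySem.Dict.empty) with hocdef
  set fin : List Int × List (List String) :=
    (PySem.List.enumerate text_list).foldl
      (fun st p =>
        let act := (st.1.filter (fun i => !((oc.2.getD p.1 []).contains i))) ++ oc.1.getD p.1 []
        (act, act.foldl (fun sg i => sg.set i.toNat ((sg[i.toNat]?.getD []) ++ [p.2])) st.2))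
      ([], keys_dict.map (fun _ => [])) with hfindef
  -- the two event dicts, as folds over the filtered event stream
  have hoc2 : oc = ((PySem.List.enumerate w).foldl
        (fun x p => if p.2.1 + 1 < p.2.2 then x.modify (p.2.1 + 1) [] (fun l => l ++ [p.1]) else x)
        PySem.Dict.empty,
      (PySem.List.enumerate w).foldl
        (fun y p => if p.2.1 + 1 < p.2.2 then y.modify p.2.2 [] (fun l => l ++ [p.1]) else y)
        PySem.Dict.empty) := by
    rw [hocdef]
    exact pv_foldl_pair (fun p : Int × (Int × Int) => p.2.1 + 1 < p.2.2)
      (fun x p => x.modify (p.2.1 + 1) [] (fun l => l ++ [p.1]))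
      (fun y p => y.modify p.2.2 [] (fun l => l ++ [p.1]))
      (PySem.List.enumerate w) PySem.Dict.empty PySem.Dict.empty
  have hocfst : oc.1 = (PySem.List.enumerate w).foldl
      (fun x p => if p.2.1 + 1 < p.2.2 then x.modify (p.2.1 + 1) [] (fun l => l ++ [p.1]) else x)
      PySem.Dict.empty := by rw [hoc2]
  have hocsnd : oc.2 = (PySem.List.enumerate w).foldl
      (fun y p => if p.2.1 + 1 < p.2.2 then y.modify p.2.2 [] (fun l => l ++ [p.1]) else y)
      PySem.Dict.empty := by rw [hoc2]
  have hOg : ∀ j : Int, oc.1.getD j []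
      = (((PySem.List.enumerate w).filter
            (fun p => decide (p.2.1 + 1 < p.2.2))).filter
          (fun p => p.2.1 + 1 == j)).map (fun p => p.1) := by
    intro j
    rw [hocfst]
    rw [PySem.List.foldl_ite_eq_foldl_filter (p := fun p : Int × (Int × Int) => p.2.1 + 1 < p.2.2)]
    exact pv_bucket _ (fun p => p.2.1 + 1) j
  have hCg : ∀ j : Int, oc.2.getD j []
      = (((PySem.List.enumerate w).filter
            (fun p => decide (p.2.1 + 1 < p.2.2))).filter
          (fun p => p.2.2 == j)).map (fun p => p.1) := by
    intro j
    rw [hocsnd]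
    rw [PySem.List.foldl_ite_eq_foldl_filter (p := fun p : Int × (Int × Int) => p.2.1 + 1 < p.2.2)]
    exact pv_bucket _ (fun p => p.2.2) j
  have hopen : ∀ (j i : Int), i ∈ oc.1.getD j [] ↔
      ∃ (m : Nat) (hm : m < w.length), i = (m : Int) ∧ (w[m]'hm).1 + 1 = j ∧ (w[m]'hm).1 + 1 < (w[m]'hm).2 := by
    intro j i
    rw [hOg]
    simp only [List.mem_map, List.mem_filter, PySem.List.mem_enumerate_iff]
    constructor
    · rintro ⟨p, ⟨⟨⟨m, hm, rfl⟩, hlt⟩, hkey⟩, rfl⟩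
      refine ⟨m, hm, by simp, ?_, by simpa using hlt⟩
      simpa using hkey
    · rintro ⟨m, hm, rfl, hkey, hlt⟩
      exact ⟨((m : Int), w[m]'hm), ⟨⟨⟨m, hm, by simp⟩, by simpa using hlt⟩, by simpa using hkey⟩, by simp⟩
  have hclose : ∀ (j i : Int), i ∈ oc.2.getD j [] ↔
      ∃ (m : Nat) (hm : m < w.length), i = (m : Int) ∧ (w[m]'hm).2 = j ∧ (w[m]'hm).1 + 1 < (w[m]'hm).2 := by
    intro j i
    rw [hCg]
    simp only [List.mem_map, List.mem_filter, PySem.List.mem_enumerate_iff]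
    constructor
    · rintro ⟨p, ⟨⟨⟨m, hm, rfl⟩, hlt⟩, hkey⟩, rfl⟩
      refine ⟨m, hm, by simp, ?_, by simpa using hlt⟩
      simpa using hkey
    · rintro ⟨m, hm, rfl, hkey, hlt⟩
      exact ⟨((m : Int), w[m]'hm), ⟨⟨⟨m, hm, by simp⟩, by simpa using hlt⟩, by simpa using hkey⟩, by simp⟩
  have hopen_nd : ∀ j : Int, (oc.1.getD j []).Nodup := by
    intro j
    rw [hOg]
    have h1 : (((PySem.List.enumerate w).filter
          (fun p => decide (p.2.1 + 1 < p.2.2))).filter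
        (fun p => p.2.1 + 1 == j)).Pairwise (fun p q => p.1 < q.1) :=
      ((PySem.List.pairwise_lt_enumerate w 0).filter _).filter _
    have h2 := h1.map (f := fun p : Int × (Int × Int) => p.1)
      (S := fun a b : Int => a ≠ b) (fun a b hab => ne_of_lt hab)
    exact h2
  -- every interval's left end is a nonnegative first-occurrence index
  have hw : ∀ p ∈ w, 0 ≤ p.1 := by
    rintro ⟨x, y⟩ hp
    have h1 : x ∈ lo := (List.of_mem_zip hp).1
    rw [hlo] at h1
    obtain ⟨k, hk, rfl⟩ := List.mem_map.mp h1
    obtain ⟨n, hn⟩ : ∃ n, PySem.List.index? text_list k = some n :=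
      Option.isSome_iff_exists.mp ((PySem.List.index?_isSome_iff text_list k).mpr (hpre k hk))
    rw [PySem.Dict.getD_eq_get?_getD, pv_pos_get?, hn]
    simp
  congr 1
  apply pv_foldl_insert_congr (k1 := fun p : Int × String => p.2)
    (v1 := fun p : Int × String =>
      if p.1 == (keys_dict.length : Int) - 1 then
        PySem.List.slice text_list
          (some (((PySem.List.index? text_list p.2).getD 0 : Int) + 1)) none
      else
        PySem.List.slice text_list
          (some (((PySem.List.index? text_list p.2).getD 0 : Int) + 1))
          (some ((PySem.List.index? text_list (PySem.List.pyGetD keys_dict (p.1 + 1) "")).getD 0 : Int)))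
    (k2 := fun q : String × List String => q.1)
    (v2 := fun q : String × List String => q.2)
  · intro d a; split <;> rfl
  · intro d b; rfl
  · -- the two (key, value) streams coincide, componentwise
    have hlen_lo : lo.length = keys_dict.length := by simp [hlo]
    have hlen_hi : hi.length = (keys_dict.length - 1) + 1 := by
      simp [hhi, hlen_lo]
    have hzip : ∀ {γ δ : Type} (l1 : List γ) (l2 : List δ) (i : Nat) (x : γ) (y : δ),
        l1[i]? = some x → l2[i]? = some y → (l1.zip l2)[i]? = some (x, y) := by
      intro γ δ l1 l2 i x y h1 h2
      simp [List.zip, List.getElem?_zipWith, h1, h2]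
    apply List.ext_getElem?
    intro j
    rw [List.getElem?_map, List.getElem?_map, PySem.List.getElem?_enumerate]
    by_cases hj : j < keys_dict.length
    · have hk : keys_dict[j]? = some keys_dict[j] := List.getElem?_eq_getElem hj
      have hmem : keys_dict[j] ∈ text_list := hpre _ (List.getElem_mem hj)
      obtain ⟨n, hn⟩ : ∃ n, PySem.List.index? text_list keys_dict[j] = some n :=
        Option.isSome_iff_exists.mp ((PySem.List.index?_isSome_iff text_list keys_dict[j]).mpr hmem)
      have hbound : ∀ (i : Nat) (hi_ : i < keys_dict.length) (m : Nat),
          PySem.List.index? text_list keys_dict[i] = some m → lo[i]? = some ((m : Int)) := by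
        intro i hi_ m hm
        rw [hlo, List.getElem?_map, List.getElem?_eq_getElem hi_]
        simp only [Option.map_some]
        rw [PySem.Dict.getD_eq_get?_getD, pv_pos_get?, hm]
        simp
      have hbj := hbound j hj n hn
      have hwlen : w.length = keys_dict.length := by
        rw [hwdef, List.length_zip, hlen_lo, hlen_hi]
        omega
      have hmw : j < w.length := by omega
      have hws : w.length ≤ (keys_dict.map (fun _ => ([] : List String))).length := by
        simp [hwlen]
      have hact0 : ∀ i : Int, i ∈ ([] : List Int) ↔ pvCov w i ((0 : Int) - 1) := by
        intro i
        simp only [List.not_mem_nil, false_iff]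
        rintro ⟨m, hm, rfl, h1, h2⟩
        have := hw (w[m]'hm) (List.getElem_mem hm)
        omega
      have hfin2 := pv_sweep w oc.1 oc.2 hopen hopen_nd hclose text_list 0 []
        (keys_dict.map (fun _ => [])) hws List.nodup_nil hact0 j hmw
      have hsegs0 : (keys_dict.map (fun _ => ([] : List String)))[j]? = some [] := by
        rw [List.getElem?_map, hk]; rfl
      rw [hk]
      by_cases hlast : j + 1 = keys_dict.length
      · -- last key: the interval closes at the end of the text
        have hhij : hi[j]? = some ((text_list.length : Int)) := by
          rw [hhi, List.getElem?_append_right (by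
            simp only [List.length_drop, hlen_lo]; omega)]
          simp only [List.length_drop, hlen_lo]
          have : j - (keys_dict.length - 1) = 0 := by omega
          rw [this]
          rfl
        have hwj? : w[j]? = some ((n : Int), (text_list.length : Int)) :=
          hzip lo hi j _ _ hbj hhij
        have hwjv : w[j]'hmw = ((n : Int), (text_list.length : Int)) := by
          rw [List.getElem?_eq_getElem hmw] at hwj?
          exact Option.some.inj hwj?
        rw [hwjv] at hfin2
        have hfe := pv_filter_enum text_list 0 n text_list.length
        simp only [Nat.cast_zero, Nat.sub_zero, Nat.max_zero] at hfe
        have hsj : fin.2[j]? = some ((text_list.drop (n + 1)).take (text_list.length - (n + 1))) := by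
          rw [hfindef, hfin2, hsegs0]
          simp only [Option.getD_some, List.nil_append, Option.some.injEq]
          exact hfe
        rw [hzip keys_dict fin.2 j _ _ hk hsj]
        simp only [Option.map_some, Option.some.injEq, Prod.mk.injEq]
        refine ⟨trivial, ?_⟩
        rw [if_pos (by simp only [beq_iff_eq]; omega), hn]
        simp only [Option.getD_some]
        have hcast : (n : Int) + 1 = ((n + 1 : Nat) : Int) := by push_cast; ring
        rw [hcast, PySem.List.slice_from_natCast]
        exact (List.take_of_length_le (by simp)).symm
      · -- middle key: the interval closes at the next key's first occurrence
        have hj1 : j + 1 < keys_dict.length := by omega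
        have hmem1 : keys_dict[j + 1] ∈ text_list := hpre _ (List.getElem_mem hj1)
        obtain ⟨n1, hn1⟩ : ∃ n1, PySem.List.index? text_list keys_dict[j + 1] = some n1 :=
          Option.isSome_iff_exists.mp
            ((PySem.List.index?_isSome_iff text_list keys_dict[j + 1]).mpr hmem1)
        have hbj1 := hbound (j + 1) hj1 n1 hn1
        have hhij : hi[j]? = some ((n1 : Int)) := by
          rw [hhi, List.getElem?_append_left (by
            simp only [List.length_drop, hlen_lo]; omega)]
          rw [List.getElem?_drop, show 1 + j = j + 1 by omega, hbj1]
        have hwj? : w[j]? = some ((n : Int), (n1 : Int)) := hzip lo hi j _ _ hbj hhij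
        have hwjv : w[j]'hmw = ((n : Int), (n1 : Int)) := by
          rw [List.getElem?_eq_getElem hmw] at hwj?
          exact Option.some.inj hwj?
        rw [hwjv] at hfin2
        have hfe := pv_filter_enum text_list 0 n n1
        simp only [Nat.cast_zero, Nat.sub_zero, Nat.max_zero] at hfe
        have hsj : fin.2[j]? = some ((text_list.drop (n + 1)).take (n1 - (n + 1))) := by
          rw [hfindef, hfin2, hsegs0]
          simp only [Option.getD_some, List.nil_append, Option.some.injEq]
          exact hfe
        rw [hzip keys_dict fin.2 j _ _ hk hsj]
        simp only [Option.map_some, Option.some.injEq, Prod.mk.injEq]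
        refine ⟨trivial, ?_⟩
        rw [if_neg (by simp only [beq_iff_eq]; omega), hn]
        have hget : PySem.List.pyGetD keys_dict ((0 : Int) + (j : Int) + 1) "" = keys_dict[j + 1] := by
          rw [show (0 : Int) + (j : Int) + 1 = ((j + 1 : Nat) : Int) by push_cast; ring]
          rw [PySem.List.pyGetD_natCast]
          exact List.getD_eq_getElem _ _ hj1
        rw [hget, hn1]
        simp only [Option.getD_some]
        have hcast : (n : Int) + 1 = ((n + 1 : Nat) : Int) := by push_cast; ring
        rw [hcast, PySem.List.slice_natCast]
    · have hk : keys_dict[j]? = none := by simp; omega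
      rw [hk]
      have hz : (keys_dict.zip fin.2)[j]? = none := by
        rw [List.getElem?_eq_none]
        simp only [List.length_zip]
        omega
      rw [hz]
      rfl

-- ===== VERDICT (by name: the statement is the Claim_ definition above) =====
theorem convert_key_value_spec : Claim_equal_convert_key_value := by
  intro keys_dict text_list _ hpre
  exact pv_main keys_dict text_list hpre
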